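-- pv_equiv track=rewrite | github.com/eliottcassidy2000/math | 04-computation/k_colored_indep_poly.py | polys_equal
-- ===== SOURCE A (Python) =====
-- def polys_equal(p1, p2):
--     """Check if two polynomials are equal (trim trailing zeros)."""
--     a = list(p1)
--     b = list(p2)
--     while len(a) > 0 and a[-1] == 0:
--         a.pop()
--     while len(b) > 0 and b[-1] == 0:
--         b.pop()
--     return a == b
-- ===== SOURCE B (Python) =====
-- def polys_equal(p1, p2):
--     """Check if two polynomials are equal (trim trailing zeros)."""
--     a = list(p1)
--     b = list(p2)
--     n = min(len(a), len(b))
--     if any(x != y for x, y in zip(a, b)):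
--         return False
--     return all(x == 0 for x in a[n:]) and all(x == 0 for x in b[n:])
-- ===== Notes on version B (the rewrite author's own statement) =====
-- stated objective: alternative
-- what changed: B never trims or copies: it compares the overlapping prefix elementwise and then checks that the surplus tail of the longer list is all zeros, instead of popping trailing zeros off both lists and comparing the normalized copies.
import Mathlib
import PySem

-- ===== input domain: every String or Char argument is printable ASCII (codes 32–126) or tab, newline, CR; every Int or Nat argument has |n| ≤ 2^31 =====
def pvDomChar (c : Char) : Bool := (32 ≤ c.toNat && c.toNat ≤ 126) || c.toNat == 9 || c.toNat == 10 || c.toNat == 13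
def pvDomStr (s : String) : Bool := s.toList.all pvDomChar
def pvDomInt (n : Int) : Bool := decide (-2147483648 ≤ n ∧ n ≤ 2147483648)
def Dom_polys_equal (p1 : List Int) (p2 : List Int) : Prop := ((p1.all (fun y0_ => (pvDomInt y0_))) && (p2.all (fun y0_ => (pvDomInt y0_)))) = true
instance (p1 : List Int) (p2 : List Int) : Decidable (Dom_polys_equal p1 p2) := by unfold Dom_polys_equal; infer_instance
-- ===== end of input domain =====

-- B compares the overlapping prefix and checks the surplus tail is all zeros, instead of
-- trimming trailing zeros off copies of both lists and comparing them (alternative decomposition).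

-- ===== PORT A =====
-- while len(a) > 0 and a[-1] == 0: a.pop()   (getLast? = some 0 ⟺ the list is nonempty with last element 0)
def pvTrimA (l : List Int) : List Int :=
  if h : l.getLast? = some 0 then pvTrimA l.dropLast else l
termination_by l.length
decreasing_by
  have hne : l ≠ [] := by intro hnil; simp [hnil] at h
  have := List.length_pos_of_ne_nil hne
  simp [List.length_dropLast]; omega

def polys_equal (p1 : List Int) (p2 : List Int) : Bool :=
  let a := p1
  let b := p2
  pvTrimA a == pvTrimA b

-- ===== PORT B =====
def polys_equal_alt (p1 : List Int) (p2 : List Int) : Bool :=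
  let a := p1
  let b := p2
  let n := min a.length b.length
  if (a.zip b).any (fun xy => xy.1 != xy.2) then false
  else (a.drop n).all (fun x => x == 0) && (b.drop n).all (fun x => x == 0)

-- ===== PRECONDITION & SPEC =====
def Spec_polys_equal (p1 : List Int) (p2 : List Int) (out : Bool) : Prop := out = polys_equal_alt p1 p2
instance (p1 : List Int) (p2 : List Int) (out : Bool) : Decidable (Spec_polys_equal p1 p2 out) := by unfold Spec_polys_equal; infer_instance

-- ===== CLAIM (what is proved, stated in full; the proofs are below) =====
def Claim_equal_polys_equal : Prop := ∀ (p1 : List Int) (p2 : List Int), Dom_polys_equal p1 p2 → Spec_polys_equal p1 p2 (polys_equal p1 p2)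

-- ===== LEMMAS AND PROOFS =====

-- front-to-back recursive trim, used as a proof intermediate
def rtrim : List Int → List Int
  | [] => []
  | x :: l =>
    match rtrim l with
    | [] => if x = 0 then [] else [x]
    | r :: rs => x :: r :: rs

lemma pvTrimA_eq_rev (l : List Int) :
    pvTrimA l = (l.reverse.dropWhile (fun x => x == 0)).reverse := by
  induction l using pvTrimA.induct with
  | case1 l h ih =>
    rw [List.getLast?_eq_some_iff] at h
    obtain ⟨l', rfl⟩ := h
    rw [pvTrimA]
    simp only [List.dropLast_concat] at ih
    simp [ih]
  | case2 l h =>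
    rw [pvTrimA, dif_neg h]
    rcases l.eq_nil_or_concat with rfl | ⟨l', a, rfl⟩
    · simp
    · have ha : a ≠ 0 := by
        intro rfl; exact h (by simp)
      have hab : ((a : Int) == 0) = false := by simp [ha]
      simp [hab]

lemma rtrim_eq_rev (l : List Int) :
    rtrim l = (l.reverse.dropWhile (fun x => x == 0)).reverse := by
  induction l with
  | nil => simp [rtrim]
  | cons x l ih =>
    rcases hr : rtrim l with _ | ⟨r, rs⟩
    · have h0 : List.dropWhile (fun x => x == 0) l.reverse = [] := by
        rw [hr] at ih
        exact List.reverse_eq_nil_iff.mp ih.symm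
      have hgoal : rtrim (x :: l) = if x = 0 then [] else [x] := by simp [rtrim, hr]
      rw [hgoal, List.reverse_cons, List.dropWhile_append, h0]
      by_cases hx : x = 0
      · subst hx; simp [List.dropWhile]
      · have hxb : ((x : Int) == 0) = false := by simp [hx]
        simp [hx, List.dropWhile, hxb]
    · have hne : List.dropWhile (fun x => x == 0) l.reverse ≠ [] := by
        intro hnil; rw [hnil] at ih; simp [ih] at hr
      simp [rtrim, hr, List.dropWhile_append, List.isEmpty_iff, hne, ← ih]

lemma pvTrimA_eq_rtrim (l : List Int) : pvTrimA l = rtrim l := by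
  rw [pvTrimA_eq_rev, rtrim_eq_rev]

lemma rtrim_nil_iff (l : List Int) : rtrim l = [] ↔ l.all (fun x => x == 0) = true := by
  induction l with
  | nil => simp [rtrim]
  | cons x l ih =>
    simp only [rtrim, List.all_cons]
    rcases hr : rtrim l with _ | ⟨r, rs⟩
    · rw [hr] at ih
      by_cases hx : x = 0 <;> simp [hx, ← ih]
    · rw [hr] at ih
      simp [← ih]

lemma rtrim_cons_beq (x y : Int) (a b : List Int) :
    (rtrim (x :: a) == rtrim (y :: b)) = ((x == y) && (rtrim a == rtrim b)) := by
  apply Bool.eq_iff_iff.mpr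
  simp only [rtrim]
  rcases rtrim a with _ | ⟨r, rs⟩ <;> rcases rtrim b with _ | ⟨s, ss⟩ <;>
    by_cases hx : x = 0 <;> by_cases hy : y = 0 <;>
      (simp_all [beq_iff_eq]; try omega)

lemma alt_eq_rtrim (a : List Int) : ∀ b : List Int,
    polys_equal_alt a b = (rtrim a == rtrim b) := by
  induction a with
  | nil =>
    intro b
    have h1 : polys_equal_alt [] b = b.all (fun x => x == 0) := by simp [polys_equal_alt]
    rw [h1]
    rcases hb : rtrim b with _ | ⟨r, rs⟩
    · simp [(rtrim_nil_iff b).mp hb, rtrim]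
    · have hall : b.all (fun x => x == 0) = false := by
        rw [← Bool.not_eq_true, ← rtrim_nil_iff, hb]; simp
      simp [hall, rtrim]
  | cons x a ih =>
    intro b
    rcases b with _ | ⟨y, b⟩
    · have h1 : polys_equal_alt (x :: a) [] = (x :: a).all (fun z => z == 0) := by
        simp [polys_equal_alt]
      rw [h1]
      rcases ha : rtrim (x :: a) with _ | ⟨r, rs⟩
      · simp [(rtrim_nil_iff (x :: a)).mp ha, rtrim]
      · have hall : (x :: a).all (fun z => z == 0) = false := by
          rw [← Bool.not_eq_true, ← rtrim_nil_iff, ha]; simp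
        simp [hall, rtrim]
    · rw [rtrim_cons_beq]
      by_cases hxy : x = y
      · subst hxy
        simp only [polys_equal_alt, List.zip_cons_cons, List.any_cons, bne_self_eq_false,
          Bool.false_or, List.length_cons, beq_self_eq_true, Bool.true_and]
        have hmin : min (a.length + 1) (b.length + 1) = min a.length b.length + 1 := by omega
        rw [hmin]
        simpa [polys_equal_alt] using ih b
      · have hb : (x != y) = true := by simp [hxy]
        have hxb : ((x : Int) == y) = false := by simp [hxy]
        simp [polys_equal_alt, hb, hxb]

-- ===== VERDICT (by name: the statement is the Claim_ definition above) =====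
theorem polys_equal_spec : Claim_equal_polys_equal := by
  intro p1 p2 _
  show polys_equal p1 p2 = polys_equal_alt p1 p2
  rw [alt_eq_rtrim]
  show (pvTrimA p1 == pvTrimA p2) = _
  rw [pvTrimA_eq_rtrim, pvTrimA_eq_rtrim]
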